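-- pv_equiv track=rewrite | github.com/Liu-Bot24/course-navigator | backend/course_navigator/ytdlp.py | _best_preferred_language
-- ===== SOURCE A (Python) =====
-- def _best_preferred_language(available: list[str], priority: tuple[str, ...]) -> str | None:
--     if not available:
--         return None
--     lowered = {language.lower(): language for language in available}
--     for preferred in priority:
--         exact = lowered.get(preferred.lower())
--         if exact:
--             return exact
--     for preferred in priority:
--         preferred_base = preferred.split("-", 1)[0].lower()
--         for candidate in available:
--             normalized = candidate.lower()
--             if normalized == f"ai-{preferred_base}" or normalized.split("-", 1)[0] == preferred_base:
--                 return candidate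
--     return None
-- ===== SOURCE B (Python) =====
-- def _best_preferred_language(available: list[str], priority: tuple[str, ...]) -> str | None:
--     exact_index = {}
--     for candidate in reversed(available):
--         exact_index.setdefault(candidate.lower(), candidate)
--     for preferred in priority:
--         exact = exact_index.get(preferred.lower())
--         if exact:
--             return exact
--     index = {}
--     for candidate in available:
--         normalized = candidate.lower()
--         index.setdefault(normalized.split("-", 1)[0], candidate)
--         if normalized.startswith("ai-"):
--             index.setdefault(normalized[3:], candidate)
--     for preferred in priority:
--         hit = index.get(preferred.split("-", 1)[0].lower())
--         if hit is not None:
--             return hit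
--     return None
-- ===== Notes on version B (the rewrite author's own statement) =====
-- stated objective: alternative
-- what changed: The fallback nested scan (priority x available) is replaced by one pass over available building an index dict keyed by base-language and ai-remainder (first occurrence wins) followed by one dict lookup per priority entry; the exact-match dict is built by setdefault over reversed(available) instead of a last-wins comprehension.
import Mathlib
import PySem

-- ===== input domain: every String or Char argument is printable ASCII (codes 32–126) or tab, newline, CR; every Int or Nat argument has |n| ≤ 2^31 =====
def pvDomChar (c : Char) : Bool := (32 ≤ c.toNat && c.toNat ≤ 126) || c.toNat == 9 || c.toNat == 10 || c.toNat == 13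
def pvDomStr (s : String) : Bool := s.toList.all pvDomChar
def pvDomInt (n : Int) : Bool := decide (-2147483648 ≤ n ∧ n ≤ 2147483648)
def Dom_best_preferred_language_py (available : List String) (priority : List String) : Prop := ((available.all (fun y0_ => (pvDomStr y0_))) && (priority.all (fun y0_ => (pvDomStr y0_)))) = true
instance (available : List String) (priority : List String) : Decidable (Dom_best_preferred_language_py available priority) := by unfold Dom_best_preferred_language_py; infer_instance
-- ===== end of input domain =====

-- ===== PORT A =====
-- shared port of the Python expression s.split("-", 1)[0]; split with a nonempty
-- separator always returns a nonempty list, so headD "" is exact (never the default)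
def pvBase (s : String) : String :=
  ((PySem.Str.splitMax? s "-" 1).getD []).headD ""

def pvLoop1 (d : PySem.Dict String String) : List String -> Option String
  | [] => none
  | p :: rest =>
    match d.get? (PySem.Str.lower p) with
    | some v => if v = "" then pvLoop1 d rest else some v
    | none => pvLoop1 d rest

def pvFindCand (b : String) : List String -> Option String
  | [] => none
  | c :: rest =>
    let n := PySem.Str.lower c
    if n == "ai-" ++ b || pvBase n == b then some c else pvFindCand b rest

def pvLoop2A (available : List String) : List String -> Option String
  | [] => none
  | p :: rest =>
    match pvFindCand (PySem.Str.lower (pvBase p)) available with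
    | some c => some c
    | none => pvLoop2A available rest

def best_preferred_language_py (available : List String) (priority : List String) : Option String :=
  if available = [] then none
  else
    let lowered := available.foldl (fun d l => d.insert (PySem.Str.lower l) l) PySem.Dict.empty
    match pvLoop1 lowered priority with
    | some v => some v
    | none => pvLoop2A available priority

-- ===== PORT B =====
def pvStepIdx (d : PySem.Dict String String) (c : String) : PySem.Dict String String :=
  let n := PySem.Str.lower c
  let d1 := d.setdefault (pvBase n) c
  if PySem.Str.startswith n "ai-" then d1.setdefault (PySem.Str.slice n (some 3) none) c else d1

def pvLookupLoop (index : PySem.Dict String String) : List String -> Option String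
  | [] => none
  | p :: rest =>
    match index.get? (PySem.Str.lower (pvBase p)) with
    | some c => some c
    | none => pvLookupLoop index rest

def best_preferred_language_py_alt (available : List String) (priority : List String) : Option String :=
  let exactIdx := available.reverse.foldl (fun d c => d.setdefault (PySem.Str.lower c) c) PySem.Dict.empty
  match pvLoop1 exactIdx priority with
  | some v => some v
  | none =>
    let index := available.foldl pvStepIdx PySem.Dict.empty
    pvLookupLoop index priority

-- ===== PRECONDITION & SPEC =====
def Spec_best_preferred_language_py (available : List String) (priority : List String) (out : Option String) : Prop := out = best_preferred_language_py_alt available priority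
instance (available : List String) (priority : List String) (out : Option String) : Decidable (Spec_best_preferred_language_py available priority out) := by unfold Spec_best_preferred_language_py; infer_instance

-- ===== CLAIM (what is proved, stated in full; the proofs are below) =====
def Claim_equal_best_preferred_language_py : Prop := ∀ (available : List String) (priority : List String), Dom_best_preferred_language_py available priority → Spec_best_preferred_language_py available priority (best_preferred_language_py available priority)

-- ===== LEMMAS AND PROOFS =====

def pvMatch (b c : String) : Bool :=
  PySem.Str.lower c == "ai-" ++ b || pvBase (PySem.Str.lower c) == b

theorem pvGet?_setdefault_or (d : PySem.Dict String String) (k v : String) (j : String) :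
    (d.setdefault k v).get? j = (d.get? j).or (if j = k then some v else none) := by
  by_cases hc : d.contains k = true
  · rw [PySem.Dict.setdefault_of_contains _ _ hc]
    by_cases hj : j = k
    · subst hj
      cases hg : d.get? j with
      | none => exact absurd ((PySem.Dict.get?_eq_none_iff_contains d j).mp hg) (by simp [hc])
      | some w => simp
    · simp [hj]
  · rw [PySem.Dict.setdefault_of_not_contains _ _ (by simpa using hc)]
    rw [PySem.Dict.get?_insert]
    by_cases hj : j = k
    · subst hj
      have : d.get? j = none := (PySem.Dict.get?_eq_none_iff_contains d j).mpr (by simpa using hc)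
      simp [this]
    · simp [hj]

theorem pvFoldl_insert_get? (xs : List String) (d : PySem.Dict String String) (k : String) :
    (xs.foldl (fun d l => d.insert (PySem.Str.lower l) l) d).get? k
      = (xs.reverse.find? (fun l => PySem.Str.lower l == k)).or (d.get? k) := by
  induction xs generalizing d with
  | nil => simp
  | cons x t ih =>
    simp only [List.foldl_cons, List.reverse_cons, List.find?_append, ih]
    rw [PySem.Dict.get?_insert]
    cases ht : t.reverse.find? (fun l => PySem.Str.lower l == k) with
    | some w => simp
    | none =>
      by_cases hx : PySem.Str.lower x = k
      · simp [hx, List.find?]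
      · have hb : (PySem.Str.lower x == k) = false := by simp [hx]
        simp [List.find?, hb, Ne.symm hx]

theorem pvFoldl_setdefault_get? (xs : List String) (d : PySem.Dict String String) (k : String) :
    (xs.foldl (fun d c => d.setdefault (PySem.Str.lower c) c) d).get? k
      = (d.get? k).or (xs.find? (fun c => PySem.Str.lower c == k)) := by
  induction xs generalizing d with
  | nil => simp
  | cons x t ih =>
    simp only [List.foldl_cons, ih, pvGet?_setdefault_or]
    by_cases hx : PySem.Str.lower x = k
    · cases hg : d.get? k <;> simp [hx, List.find?, hg]
    · have hb : (PySem.Str.lower x == k) = false := by simp [hx]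
      cases hg : d.get? k <;> simp [List.find?, hb, hg, Option.or, Ne.symm hx]

theorem pvExactDictsAgree (available : List String) (k : String) :
    (available.foldl (fun d l => d.insert (PySem.Str.lower l) l) PySem.Dict.empty).get? k
      = (available.reverse.foldl (fun d c => d.setdefault (PySem.Str.lower c) c) PySem.Dict.empty).get? k := by
  rw [pvFoldl_insert_get?, pvFoldl_setdefault_get?]
  simp

theorem pvLoop1_congr (d d' : PySem.Dict String String)
    (h : ∀ k, d.get? k = d'.get? k) (pr : List String) :
    pvLoop1 d pr = pvLoop1 d' pr := by
  induction pr with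
  | nil => rfl
  | cons p rest ih => simp only [pvLoop1, h, ih]

theorem pvSliceDrop3 (l : List Char) : PySem.List.slice l (some 3) none = l.drop 3 := by
  rw [PySem.List.slice_from _ (by norm_num)]
  rfl

theorem pvAiString (n b : String) :
    n = "ai-" ++ b ↔ (PySem.Str.startswith n "ai-" = true ∧ PySem.Str.slice n (some 3) none = b) := by
  have hts : (PySem.Str.slice n (some 3) none).toList = n.toList.drop 3 := by
    simp [pvSliceDrop3]
  constructor
  · rintro rfl
    refine ⟨?_, ?_⟩
    · have h : ("ai-").toList <+: ("ai-" ++ b).toList := by simp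
      simpa [PySem.Chars.startswith_iff] using h
    · apply String.toList_inj.mp
      rw [hts, String.toList_append, show ("ai-").toList = ['a', 'i', '-'] from rfl]
      rfl
  · rintro ⟨hsw, hsl⟩
    have hdrop : n.toList.drop 3 = b.toList := by
      rw [← hts, hsl]
    obtain ⟨t, ht⟩ := (PySem.Chars.startswith_iff _ _).mp (by simpa using hsw)
    have ht' : ['a', 'i', '-'] ++ t = n.toList := ht
    have htb : t = b.toList := by
      rw [← hdrop, ← ht']
      rfl
    apply String.toList_inj.mp
    rw [String.toList_append, ← ht', htb]
    rfl

theorem pvStepIdx_get? (d : PySem.Dict String String) (c b : String) :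
    (pvStepIdx d c).get? b = (d.get? b).or (if pvMatch b c then some c else none) := by
  simp only [pvStepIdx, pvMatch]
  by_cases hsw : PySem.Str.startswith (PySem.Str.lower c) "ai-" = true
  · rw [if_pos hsw, pvGet?_setdefault_or, pvGet?_setdefault_or, Option.or_assoc]
    congr 1
    by_cases h2 : b = PySem.Str.slice (PySem.Str.lower c) (some 3) none
    · have heq : PySem.Str.lower c = "ai-" ++ b := (pvAiString _ _).mpr ⟨hsw, h2.symm⟩
      have hb1 : (PySem.Str.lower c == "ai-" ++ b) = true := by simp [heq]
      by_cases h1 : b = pvBase (PySem.Str.lower c) <;>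
        simp [h1, ← h2, hb1, Option.or]
    · have hne : ¬ (PySem.Str.lower c = "ai-" ++ b) := fun h => h2 (((pvAiString _ _).mp h).2.symm)
      have hb1 : (PySem.Str.lower c == "ai-" ++ b) = false := by simp [hne]
      by_cases h1 : b = pvBase (PySem.Str.lower c)
      · have hb2 : (pvBase (PySem.Str.lower c) == b) = true := by simp [h1]
        simp [h1, h2, hb1, hb2, Option.or]
      · have hb2 : (pvBase (PySem.Str.lower c) == b) = false := by simp [Ne.symm h1]
        simp [h1, h2, hb1, hb2, Option.or]
  · rw [if_neg hsw, pvGet?_setdefault_or]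
    congr 1
    have hne : ¬ (PySem.Str.lower c = "ai-" ++ b) := fun h => hsw ((pvAiString _ _).mp h).1
    have hb1 : (PySem.Str.lower c == "ai-" ++ b) = false := by simp [hne]
    by_cases h1 : b = pvBase (PySem.Str.lower c)
    · have hb2 : (pvBase (PySem.Str.lower c) == b) = true := by simp [h1]
      simp [h1, hb1, hb2]
    · have hb2 : (pvBase (PySem.Str.lower c) == b) = false := by simp [Ne.symm h1]
      simp [h1, hb1, hb2]

theorem pvFoldl_stepIdx_get? (xs : List String) (d : PySem.Dict String String) (b : String) :
    (xs.foldl pvStepIdx d).get? b = (d.get? b).or (xs.find? (fun c => pvMatch b c)) := by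
  induction xs generalizing d with
  | nil => simp
  | cons x t ih =>
    simp only [List.foldl_cons, ih, pvStepIdx_get?]
    by_cases hx : pvMatch b x
    · cases hg : d.get? b <;> simp [hx, List.find?, hg]
    · cases hg : d.get? b <;> simp [hx, List.find?, hg, Option.or]

theorem pvFindCand_eq_find? (b : String) (xs : List String) :
    pvFindCand b xs = xs.find? (fun c => pvMatch b c) := by
  induction xs with
  | nil => rfl
  | cons x t ih =>
    simp only [pvFindCand, pvMatch, List.find?]
    cases hcond : (PySem.Str.lower x == "ai-" ++ b || pvBase (PySem.Str.lower x) == b) <;>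
      simp [hcond, ih, pvMatch]

theorem pvLoops2Agree (available : List String) (pr : List String) :
    pvLoop2A available pr = pvLookupLoop (available.foldl pvStepIdx PySem.Dict.empty) pr := by
  induction pr with
  | nil => rfl
  | cons p rest ih =>
    simp only [pvLoop2A, pvLookupLoop, pvFoldl_stepIdx_get?, PySem.Dict.get?_empty,
      Option.none_or, pvFindCand_eq_find?, ih]

theorem pvLoop1_empty (pr : List String) : pvLoop1 PySem.Dict.empty pr = none := by
  induction pr with
  | nil => rfl
  | cons p rest ih => simp [pvLoop1, ih]

theorem pvLookupLoop_empty (pr : List String) : pvLookupLoop PySem.Dict.empty pr = none := by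
  induction pr with
  | nil => rfl
  | cons p rest ih => simp [pvLookupLoop, ih]

-- ===== VERDICT (by name: the statement is the Claim_ definition above) =====
theorem best_preferred_language_py_spec : Claim_equal_best_preferred_language_py := by
  intro available priority _
  unfold Spec_best_preferred_language_py best_preferred_language_py best_preferred_language_py_alt
  by_cases hav : available = []
  · subst hav
    simp [pvLoop1_empty, pvLookupLoop_empty]
  · simp only [hav, if_false]
    rw [pvLoop1_congr _ _ (pvExactDictsAgree available) priority]
    cases pvLoop1 (available.reverse.foldl (fun d c => d.setdefault (PySem.Str.lower c) c) PySem.Dict.empty) priority with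
    | some v => rfl
    | none => simpa using pvLoops2Agree available priority
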